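-- pv_equiv track=rewrite | github.com/justekouassi/mini-programmes-python | OccurenceMot.py | OccurenceMot
-- ===== SOURCE A (Python) =====
-- def OccurenceMot(phrase):
--     if len(phrase) == 0:
--         return 0
--     else:
--         i, comp = 0, 0
--         while i < len(phrase):
--             if phrase[i] == ' ' or phrase[i] == "'" or i == len(phrase)-1:
--                 comp += 1
--             i += 1
--         return comp
-- ===== SOURCE B (Python) =====
-- def OccurenceMot(phrase):
--     if len(phrase) == 0:
--         return 0
--     parts = phrase.replace("'", " ").split(" ")
--     if parts[-1] == "":
--         return len(parts) - 1
--     return len(parts)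
-- ===== Notes on version B (the rewrite author's own statement) =====
-- stated objective: faster
-- what changed: Replaces A's index-based scanning loop (which tests separator chars and the last-index condition inside the loop) by a split-based formulation: normalise apostrophes to spaces, split on spaces, and return the number of parts, minus one when the string ends in a separator (empty final part).
import Mathlib
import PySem

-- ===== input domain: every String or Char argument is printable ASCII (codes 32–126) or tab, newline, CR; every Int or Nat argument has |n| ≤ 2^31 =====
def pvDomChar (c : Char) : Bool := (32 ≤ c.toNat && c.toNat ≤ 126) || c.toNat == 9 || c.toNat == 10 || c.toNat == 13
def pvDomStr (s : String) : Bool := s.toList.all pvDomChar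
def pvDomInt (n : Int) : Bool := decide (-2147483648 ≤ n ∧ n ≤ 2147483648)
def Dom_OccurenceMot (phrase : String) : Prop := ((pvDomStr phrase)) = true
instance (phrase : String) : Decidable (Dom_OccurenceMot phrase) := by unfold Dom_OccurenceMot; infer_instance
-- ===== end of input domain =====

-- B replaces A's per-character index loop by a split-based formulation: normalise
-- apostrophes to spaces, split on spaces, count parts (minus the trailing empty part,
-- if any); objective: faster (constant factor, measured).

-- ===== PORT A =====
-- while loop over indices i, accumulator comp
def OccAuxA (cs : List Char) (i comp : Int) : Int :=
  if _h : i < (cs.length : Int) then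
    OccAuxA cs (i + 1)
      (if PySem.List.pyGetD cs i ' ' == ' ' || PySem.List.pyGetD cs i ' ' == '\'' ||
          i == (cs.length : Int) - 1
       then comp + 1 else comp)
  else comp
termination_by ((cs.length : Int) - i).toNat
decreasing_by omega

def OccurenceMot (phrase : String) : Int :=
  if phrase.toList.length = 0 then 0
  else OccAuxA phrase.toList 0 0

-- ===== PORT B =====
-- parts[-1] in Source B is on a provably nonempty list; pyGetD's default "" is never used
def OccurenceMot_alt (phrase : String) : Int :=
  if phrase.toList.length = 0 then 0
  else
    let parts := (PySem.Str.split? (PySem.Str.replace phrase "'" " ") " ").getD []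
    if PySem.List.pyGetD parts (-1) "" = "" then (parts.length : Int) - 1
    else (parts.length : Int)

-- ===== PRECONDITION & SPEC =====
def Spec_OccurenceMot (phrase : String) (out : Int) : Prop := out = OccurenceMot_alt phrase
instance (phrase : String) (out : Int) : Decidable (Spec_OccurenceMot phrase out) := by unfold Spec_OccurenceMot; infer_instance

-- ===== CLAIM (what is proved, stated in full; the proofs are below) =====
def Claim_equal_OccurenceMot : Prop := ∀ (phrase : String), Dom_OccurenceMot phrase → Spec_OccurenceMot phrase (OccurenceMot phrase)

-- ===== LEMMAS AND PROOFS =====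

-- A's loop computes: separator count + 1 unless the last char is a separator
theorem occAuxA_eq (cs : List Char) (hne : cs ≠ []) :
    ∀ (k : Nat) (i comp : Int), 0 ≤ i → ((cs.length : Int) - i).toNat = k →
    OccAuxA cs i comp =
      comp + ((cs.drop i.toNat).countP (fun c => c == ' ' || c == '\'') : Int) +
      (if i < (cs.length : Int) ∧
          ¬ ((cs.getLast hne == ' ' || cs.getLast hne == '\'') = true) then 1 else 0) := by
  intro k
  induction k with
  | zero =>
    intro i comp h0 hk
    have hge : (cs.length : Int) ≤ i := by omega
    rw [OccAuxA]
    have hdrop : cs.drop i.toNat = [] := List.drop_eq_nil_of_le (by omega)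
    simp [hdrop, not_lt.mpr hge]
  | succ k ih =>
    intro i comp h0 hk
    have hlt : i < (cs.length : Int) := by omega
    have hltn : i.toNat < cs.length := by omega
    rw [OccAuxA]
    simp only [hlt, dif_pos]
    rw [ih (i + 1) _ (by omega) (by omega)]
    have hget : PySem.List.pyGetD cs i ' ' = cs[i.toNat] :=
      PySem.List.pyGetD_eq_getElem cs ' ' h0 hlt
    have hdrop : cs.drop i.toNat = cs[i.toNat] :: cs.drop (i.toNat + 1) :=
      List.drop_eq_getElem_cons hltn
    have hdrop1 : cs.drop (i + 1).toNat = cs.drop (i.toNat + 1) := by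
      congr 1; omega
    have hlast : cs.getLast hne = cs[cs.length - 1] := List.getLast_eq_getElem hne
    rw [hget, hdrop1, hdrop]
    rw [List.countP_cons]
    by_cases hend : i = (cs.length : Int) - 1
    · have hnext : ¬ (i + 1 < (cs.length : Int)) := by omega
      have hle : cs.getLast hne = cs[i.toNat] := by rw [hlast]; congr 1; omega
      rw [hle]
      simp only [hend, beq_self_eq_true, Bool.or_true, if_true,
        Bool.or_eq_true, beq_iff_eq, not_or, true_and]
      split_ifs <;> push_cast <;> first | omega | tauto
    · have hmid : i + 1 < (cs.length : Int) := by omega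
      have hend' : (i == (cs.length : Int) - 1) = false := by simp [hend]
      simp only [hend', Bool.or_false, Bool.or_eq_true, beq_iff_eq, not_or, hmid, true_and]
      split_ifs <;> push_cast <;> omega

-- single-char replace is a map
theorem replaceGo_single (o n : Char) :
    ∀ (fuel : Nat) (l acc : List Char), l.length ≤ fuel →
    PySem.Chars.replace.go [o] [n] fuel l acc =
      acc.reverse ++ l.map (fun c => if c = o then n else c) := by
  intro fuel
  induction fuel with
  | zero =>
    intro l acc h
    have : l = [] := List.eq_nil_of_length_eq_zero (by omega)
    subst this
    simp [PySem.Chars.replace.go]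
  | succ fuel ih =>
    intro l acc h
    cases l with
    | nil => simp [PySem.Chars.replace.go]
    | cons c t =>
      rw [PySem.Chars.replace.go]
      have hpre : [o].isPrefixOf (c :: t) = (o == c) := by
        simp [List.isPrefixOf]
      rw [hpre]
      by_cases hco : o = c
      · subst hco
        simp only [beq_self_eq_true, if_true, List.length_cons, List.length_nil,
          List.drop_succ_cons, List.drop_zero]
        rw [ih t (([n].reverse) ++ acc) (by simpa using Nat.le_of_succ_le_succ h)]
        simp
      · have : (o == c) = false := by simp [hco]
        rw [this]
        simp only [Bool.false_eq_true, if_false]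
        rw [ih t (c :: acc) (by simpa using Nat.le_of_succ_le_succ h)]
        simp [Ne.symm hco]

theorem replace_single (cs : List Char) (o n : Char) :
    PySem.Chars.replace cs [o] [n] = cs.map (fun c => if c = o then n else c) := by
  unfold PySem.Chars.replace
  simp only [List.isEmpty_cons, Bool.false_eq_true, if_false]
  exact replaceGo_single o n cs.length cs [] le_rfl

-- reference single-char splitter
def splitChar (d : Char) : List Char → List (List Char)
  | [] => [[]]
  | c :: rest =>
      if c = d then [] :: splitChar d rest
      else
        match splitChar d rest with
        | [] => [[c]]
        | p :: ps => (c :: p) :: ps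

theorem splitChar_ne_nil (d : Char) (cs : List Char) : splitChar d cs ≠ [] := by
  cases cs with
  | nil => simp [splitChar]
  | cons c rest =>
    unfold splitChar
    by_cases h : c = d
    · simp [h]
    · simp only [h, if_false]
      cases splitChar d rest <;> simp

theorem splitChar_exists_cons (d : Char) (t : List Char) :
    ∃ p ps, splitChar d t = p :: ps := by
  cases hsp : splitChar d t with
  | nil => exact absurd hsp (splitChar_ne_nil d t)
  | cons p ps => exact ⟨p, ps, rfl⟩

theorem splitChar_cons_eq (d : Char) (t : List Char) :
    splitChar d (d :: t) = [] :: splitChar d t := by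
  simp [splitChar]

theorem splitChar_cons_ne (d c : Char) (t : List Char) (h : c ≠ d)
    (p : List Char) (ps : List (List Char)) (hps : splitChar d t = p :: ps) :
    splitChar d (c :: t) = (c :: p) :: ps := by
  simp only [splitChar]; rw [if_neg h, hps]

theorem splitGo_single (d : Char) :
    ∀ (fuel : Nat) (l cur : List Char) (acc : List (List Char)), l.length ≤ fuel →
    PySem.Chars.splitOn.go [d] fuel l cur acc =
      acc.reverse ++ (splitChar d l).modifyHead (cur.reverse ++ ·) := by
  intro fuel
  induction fuel with
  | zero =>
    intro l cur acc h
    have : l = [] := List.eq_nil_of_length_eq_zero (by omega)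
    subst this
    simp [PySem.Chars.splitOn.go, splitChar]
  | succ fuel ih =>
    intro l cur acc h
    cases l with
    | nil => simp [PySem.Chars.splitOn.go, splitChar]
    | cons c t =>
      rw [PySem.Chars.splitOn.go]
      have hpre : [d].isPrefixOf (c :: t) = (d == c) := by
        simp [List.isPrefixOf]
      rw [hpre]
      obtain ⟨p, ps, hps⟩ := splitChar_exists_cons d t
      by_cases hcd : d = c
      · subst hcd
        simp only [beq_self_eq_true, if_true, List.length_cons, List.length_nil,
          List.drop_succ_cons, List.drop_zero]
        rw [ih t [] (cur.reverse :: acc) (by simpa using Nat.le_of_succ_le_succ h)]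
        rw [splitChar_cons_eq, hps]
        simp
      · have : (d == c) = false := by simp [hcd]
        rw [this]
        simp only [Bool.false_eq_true, if_false]
        rw [ih t (c :: cur) acc (by simpa using Nat.le_of_succ_le_succ h)]
        rw [splitChar_cons_ne d c t (Ne.symm hcd) p ps hps, hps]
        simp

theorem splitOn_single (cs : List Char) (d : Char) :
    PySem.Chars.splitOn cs [d] = splitChar d cs := by
  unfold PySem.Chars.splitOn
  rw [splitGo_single d (cs.length + 1) cs [] [] (by omega)]
  obtain ⟨p, ps, hps⟩ := splitChar_exists_cons d cs
  rw [hps]; simp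

theorem splitChar_length (d : Char) (cs : List Char) :
    (splitChar d cs).length = cs.count d + 1 := by
  induction cs with
  | nil => simp [splitChar]
  | cons c rest ih =>
    obtain ⟨p, ps, hps⟩ := splitChar_exists_cons d rest
    by_cases h : c = d
    · subst h
      rw [splitChar_cons_eq]
      simp [List.count_cons, ih]
    · rw [splitChar_cons_ne d c rest h p ps hps]
      rw [hps] at ih
      have hcd : (c == d) = false := by simp [h]
      simp only [List.length_cons] at ih ⊢
      simp [List.count_cons, hcd, ih]

theorem splitChar_last_empty (d : Char) (cs : List Char) :
    (splitChar d cs).getLast? = some [] ↔ (cs = [] ∨ cs.getLast? = some d) := by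
  induction cs with
  | nil => simp [splitChar]
  | cons c rest ih =>
    obtain ⟨p, ps, hps⟩ := splitChar_exists_cons d rest
    rw [hps] at ih
    by_cases h : c = d
    · subst h
      rw [splitChar_cons_eq, hps]
      cases rest with
      | nil =>
        have : p = [] ∧ ps = [] := by
          have := hps.symm.trans (by simp [splitChar] : splitChar c [] = [[]])
          exact ⟨(List.cons.injEq _ _ _ _ ▸ this).1.symm ▸ rfl, by
            cases this; rfl⟩
        rcases this with ⟨hp, hq⟩
        subst hp; subst hq
        simp
      | cons r rs =>
        simp only [List.getLast?_cons_cons]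
        rw [ih]
        simp
    · rw [splitChar_cons_ne d c rest h p ps hps]
      cases ps with
      | nil =>
        -- one single part: rest contains no d, so rest cannot end with d
        have hcount : rest.count d = 0 := by
          have hl := splitChar_length d rest
          rw [hps] at hl
          simpa using hl.symm
        have hnomem : d ∉ rest := by
          intro hmem
          have := List.count_pos_iff.mpr hmem
          omega
        constructor
        · intro hx; simp at hx
        · intro hx
          rcases hx with hx | hx
          · exact absurd hx (by simp)
          · cases rest with
            | nil =>
              simp at hx
              exact absurd hx h
            | cons r rs =>
              rw [List.getLast?_cons_cons] at hx
              exact absurd (List.mem_of_getLast? hx) hnomem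
      | cons q qs =>
        have hrestne : rest ≠ [] := by
          intro hr
          subst hr
          have : ([[]] : List (List Char)) = p :: q :: qs := by
            simpa [splitChar] using hps
          simp at this
        obtain ⟨r, rs, hr⟩ : ∃ r rs, rest = r :: rs := by
          cases rest with
          | nil => exact absurd rfl hrestne
          | cons r rs => exact ⟨r, rs, rfl⟩
        subst hr
        simp only [List.getLast?_cons_cons]
        constructor
        · intro hx
          right
          exact (ih.mp (by rw [List.getLast?_cons_cons]; exact hx)).resolve_left (by simp)
        · intro hx
          have := ih.mpr (Or.inr (hx.resolve_left (by simp)))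
          rw [List.getLast?_cons_cons] at this
          exact this

-- final assembly helpers
theorem countP_map_sep (cs : List Char) :
    ((cs.map (fun c => if c = '\'' then ' ' else c)).count ' ') =
      cs.countP (fun c => c == ' ' || c == '\'') := by
  rw [List.count_eq_countP, List.countP_map]
  apply List.countP_congr
  intro c _
  by_cases h1 : c = '\''
  · simp [h1]
  · by_cases h2 : c = ' ' <;> simp [h1, h2, Function.comp]

theorem getLast?_map_sep (cs : List Char) :
    ((cs.map (fun c => if c = '\'' then ' ' else c)).getLast? = some ' ') ↔
      (∃ x, cs.getLast? = some x ∧ (x = ' ' ∨ x = '\'')) := by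
  rw [List.getLast?_map]
  constructor
  · intro h
    cases hx : cs.getLast? with
    | none => rw [hx] at h; simp at h
    | some x =>
      rw [hx] at h
      simp only [Option.map_some, Option.some.injEq] at h
      refine ⟨x, rfl, ?_⟩
      by_cases h1 : x = '\''
      · right; exact h1
      · left; rw [if_neg h1] at h; exact h
  · rintro ⟨x, hx, hor⟩
    rw [hx]
    rcases hor with h | h <;> subst h <;> simp

-- ===== VERDICT (by name: the statement is the Claim_ definition above) =====
theorem OccurenceMot_spec : Claim_equal_OccurenceMot := by
  intro phrase _
  unfold Spec_OccurenceMot OccurenceMot OccurenceMot_alt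
  by_cases hnil : phrase.toList.length = 0
  · simp [hnil]
  · simp only [hnil, if_false]
    have hne : phrase.toList ≠ [] := by
      intro h; rw [h] at hnil; simp at hnil
    -- identify the list of parts
    have hrep : (PySem.Str.replace phrase "'" " ").toList =
        phrase.toList.map (fun c => if c = '\'' then ' ' else c) := by
      rw [PySem.Str.toList_replace]
      have : ("'" : String).toList = ['\''] := by decide
      rw [this]
      have : (" " : String).toList = [' '] := by decide
      rw [this]
      exact replace_single _ _ _
    set f : Char → Char := fun c => if c = '\'' then ' ' else c with hf
    set cs' : List Char := phrase.toList.map f with hcs'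
    have hchars : PySem.Chars.split? (PySem.Str.replace phrase "'" " ").toList
        (" " : String).toList = some (splitChar ' ' cs') := by
      have hsp : (" " : String).toList = [' '] := by decide
      rw [hsp, hrep]
      unfold PySem.Chars.split?
      rw [if_neg (by simp)]
      rw [splitOn_single]
    obtain ⟨parts, hparts⟩ : ∃ parts,
        PySem.Str.split? (PySem.Str.replace phrase "'" " ") " " = some parts := by
      cases hq : PySem.Str.split? (PySem.Str.replace phrase "'" " ") " " with
      | none =>
        have := PySem.Str.split?_map (PySem.Str.replace phrase "'" " ") " "
        rw [hq, hchars] at this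
        simp at this
      | some parts => exact ⟨parts, rfl⟩
    have hmap : parts.map String.toList = splitChar ' ' cs' := by
      have := PySem.Str.split?_map (PySem.Str.replace phrase "'" " ") " "
      rw [hparts, hchars] at this
      simpa using this
    rw [hparts]
    simp only [Option.getD_some]
    -- parts is nonempty
    have hplen : parts.length = (splitChar ' ' cs').length := by
      rw [← hmap, List.length_map]
    have hpne : parts ≠ [] := by
      intro h
      have := splitChar_ne_nil ' ' cs'
      rw [← hmap, h] at this
      simp at this
    -- rewrite A's loop
    rw [occAuxA_eq phrase.toList hne phrase.toList.length 0 0 le_rfl (by simp)]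
    simp only [Int.toNat_zero, List.drop_zero]
    -- rewrite parts[-1]
    rw [PySem.List.pyGetD_neg_one parts "" hpne]
    have hlast? : parts.getLast? = some (parts.getLast hpne) := List.getLast?_eq_some_getLast hpne
    -- B's length in terms of the count
    have hlen : (parts.length : Int) = (cs'.count ' ' : Int) + 1 := by
      rw [hplen, splitChar_length]; push_cast; ring
    have hcount : cs'.count ' ' = phrase.toList.countP (fun c => c == ' ' || c == '\'') := by
      rw [hcs', hf]; exact countP_map_sep phrase.toList
    -- the branch conditions agree
    have hlastchar : phrase.toList.getLast? = some (phrase.toList.getLast hne) :=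
      List.getLast?_eq_some_getLast hne
    have hiff : (parts.getLast hpne = "") ↔
        ((phrase.toList.getLast hne == ' ' || phrase.toList.getLast hne == '\'') = true) := by
      have h1 : (parts.getLast hpne = "") ↔ (splitChar ' ' cs').getLast? = some [] := by
        constructor
        · intro h
          rw [← hmap, List.getLast?_map, hlast?, h]
          simp
        · intro h
          rw [← hmap, List.getLast?_map, hlast?] at h
          simp only [Option.map_some, Option.some.injEq] at h
          have : (parts.getLast hpne) = ("" : String) := by
            apply String.ext  -- toList injective
            simpa using h
          exact this
      rw [h1, splitChar_last_empty]
      have hcs'ne : cs' ≠ [] := by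
        rw [hcs']; simp [hne]
      constructor
      · intro h
        rcases h with h | h
        · exact absurd h hcs'ne
        · rw [hcs'] at h
          rw [getLast?_map_sep] at h
          obtain ⟨x, hx, hor⟩ := h
          rw [hlastchar] at hx
          simp only [Option.some.injEq] at hx
          subst hx
          rcases hor with h | h <;> simp [h]
      · intro h
        right
        rw [hcs', getLast?_map_sep]
        refine ⟨phrase.toList.getLast hne, hlastchar, ?_⟩
        simp only [Bool.or_eq_true, beq_iff_eq] at h
        exact h
    have hpos : 0 < (phrase.toList.length : Int) := by
      have := List.length_pos_of_ne_nil hne; omega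
    by_cases hsep : (phrase.toList.getLast hne == ' ' || phrase.toList.getLast hne == '\'') = true
    · rw [if_pos (hiff.mpr hsep)]
      simp only [hsep, not_true_eq_false, and_false, if_false]
      rw [hlen, hcount]
      push_cast; ring
    · rw [if_neg (fun h => hsep (hiff.mp h))]
      rw [if_pos (⟨hpos, hsep⟩ : 0 < (phrase.toList.length : Int) ∧
        ¬(phrase.toList.getLast hne == ' ' || phrase.toList.getLast hne == '\'') = true)]
      rw [hlen, hcount]
      push_cast; ring
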